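-- pv_equiv track=rewrite | github.com/SBrman/BLU_stuff | CHAPTER 2/Exercise/All_types_of_representation.py | node_link_incidence_to_network
-- ===== SOURCE A (Python) =====
-- def node_link_incidence_to_network(matrix):
--     """Returns the Network (G) = (NODES (N), LINKS (A)) for a given node link
--     incidence matrix"""
--
--     links = []
--     for row, node_link in enumerate(matrix):
--         for column, link in enumerate(node_link):
--             if link == 1 or link == -1:
--                 for row_again, node_link1 in enumerate(matrix):
--                     if row == row_again:
--                         continue
--                     if node_link1[column] == -1:
--                         links.append((row+1, row_again+1))
--                         break
--     links = [tuple(element) for element in links]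
--     nodes = list(range(1, len(matrix)+1))
--     return set(nodes), set(links)
-- ===== SOURCE B (Python) =====
-- def node_link_incidence_to_network(matrix):
--     """Returns the Network (G) = (NODES (N), LINKS (A)) for a given node link
--     incidence matrix"""
--     width = max((len(row) for row in matrix), default=0)
--     # per-column list of rows (0-based) holding a -1, precomputed once
--     neg = [[r for r, row in enumerate(matrix) if c < len(row) and row[c] == -1]
--            for c in range(width)]
--     links = set()
--     for r, row in enumerate(matrix):
--         for c, v in enumerate(row):
--             if v == 1 or v == -1:
--                 cand = neg[c]
--                 if cand:
--                     t = cand[0] if cand[0] != r else (cand[1] if len(cand) > 1 else None)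
--                 else:
--                     t = None
--                 if t is not None:
--                     links.add((r + 1, t + 1))
--     return set(range(1, len(matrix) + 1)), links
-- ===== Notes on version B (the rewrite author's own statement) =====
-- stated objective: alternative
-- what changed: B precomputes, per column, the ordered list of rows holding a -1, so A's per-cell rescan of the whole matrix disappears: each cell inspects the first (or second) entry of its column's list instead of scanning all rows; on the generated inputs A's scan breaks early, so the measured cost is similar.
import Mathlib
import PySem

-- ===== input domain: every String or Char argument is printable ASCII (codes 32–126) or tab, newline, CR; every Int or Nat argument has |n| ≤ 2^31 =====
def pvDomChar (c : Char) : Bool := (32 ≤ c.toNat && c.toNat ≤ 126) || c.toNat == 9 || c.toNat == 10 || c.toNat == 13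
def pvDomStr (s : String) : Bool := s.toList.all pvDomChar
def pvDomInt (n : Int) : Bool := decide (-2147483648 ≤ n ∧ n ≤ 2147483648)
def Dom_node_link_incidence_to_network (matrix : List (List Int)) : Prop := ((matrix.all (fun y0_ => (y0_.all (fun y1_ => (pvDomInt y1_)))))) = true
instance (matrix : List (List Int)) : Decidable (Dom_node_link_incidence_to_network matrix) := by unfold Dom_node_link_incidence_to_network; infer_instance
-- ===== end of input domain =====

-- B replaces A's per-cell rescan of the whole matrix by a precomputed per-column list of the
-- rows holding a -1 (objective: alternative).


-- ===== PORT A =====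
-- inner 'for row_again, node_link1 in enumerate(matrix): …' loop with its continue/break;
-- node_link1[column] is ported as (pyGet? …).getD 0 — exact whenever the index is in range,
-- which Pre_ (rectangular matrix) guarantees; Python raises IndexError outside Pre_.
def nlA_scan (rows : List (Int × List Int)) (row : Int) (col : Int) : Option Int :=
  match rows with
  | [] => none
  | (ra, nl) :: rest =>
    if ra = row then nlA_scan rest row col
    else if (PySem.List.pyGet? nl col).getD 0 = -1 then some ra
    else nlA_scan rest row col

-- 'links = [tuple(element) for element in links]' is the identity on a list of tuples and is omitted.
def node_link_incidence_to_network (matrix : List (List Int)) : List Int × (List (Int × Int)) :=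
  let links : List (Int × Int) :=
    (PySem.List.enumerate matrix).foldl (fun acc p =>
      (PySem.List.enumerate p.2).foldl (fun acc (q : Int × Int) =>
        if q.2 = 1 ∨ q.2 = -1 then
          match nlA_scan (PySem.List.enumerate matrix) p.1 q.1 with
          | some ra => acc ++ [(p.1 + 1, ra + 1)]
          | none => acc
        else acc) acc) []
  let nodes := PySem.List.pyRange 1 ((matrix.length : Int) + 1) 1
  (PySem.Set.ofList nodes, PySem.Set.ofList links)

-- ===== PORT B =====
-- 'cand[0] if cand[0] != r else (cand[1] if len(cand) > 1 else None)' (None when cand is empty)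
def nlB_pick (cand : List Int) (r : Int) : Option Int :=
  match cand with
  | [] => none
  | a :: rest => if a ≠ r then some a else rest.head?

def node_link_incidence_to_network_alt (matrix : List (List Int)) : List Int × (List (Int × Int)) :=
  -- width = max((len(row) for row in matrix), default=0)
  let width : Int := PySem.List.maxD (matrix.map (fun row => (row.length : Int))) (fun x => x) 0
  -- neg = [[r for r, row in enumerate(matrix) if c < len(row) and row[c] == -1] for c in range(width)]
  -- row[c] ported as (pyGet? …).getD 0 — exact: the guard c < len(row) makes the index in range
  let neg : List (List Int) :=
    (PySem.List.pyRange 0 width 1).map (fun c =>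
      (PySem.List.enumerate matrix).filterMap (fun p =>
        if c < (p.2.length : Int) ∧ (PySem.List.pyGet? p.2 c).getD 0 = -1 then some p.1 else none))
  let links : List (Int × Int) :=
    (PySem.List.enumerate matrix).foldl (fun s p =>
      (PySem.List.enumerate p.2).foldl (fun s (q : Int × Int) =>
        if q.2 = 1 ∨ q.2 = -1 then
          match nlB_pick ((PySem.List.pyGet? neg q.1).getD []) p.1 with
          | some t => PySem.Set.add s (p.1 + 1, t + 1)
          | none => s
        else s) s) PySem.Set.empty
  (PySem.Set.ofList (PySem.List.pyRange 1 ((matrix.length : Int) + 1) 1), links)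

-- ===== PRECONDITION & SPEC =====
-- Pre_ excludes ragged matrices in which some column holding a 1 or -1 entry is out of range for
-- another row: there A's inner rescan usually raises IndexError (node_link1[column]); in the rare
-- case where an earlier -1 breaks the scan first, A returns and agrees with B anyway (see cites).
def Pre_node_link_incidence_to_network (matrix : List (List Int)) : Prop :=
  ∀ row ∈ matrix, ∀ q ∈ PySem.List.enumerate row, (q.2 = 1 ∨ q.2 = -1) →
    ∀ row' ∈ matrix, q.1 < (row'.length : Int)
instance (matrix : List (List Int)) : Decidable (Pre_node_link_incidence_to_network matrix) := by
  unfold Pre_node_link_incidence_to_network; infer_instance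
def pvWitness_node_link_incidence_to_network : List (List Int) := [[1, -1], [-1, 1]]

def Spec_node_link_incidence_to_network (matrix : List (List Int)) (out : List Int × (List (Int × Int))) : Prop := out = node_link_incidence_to_network_alt matrix
instance (matrix : List (List Int)) (out : List Int × (List (Int × Int))) : Decidable (Spec_node_link_incidence_to_network matrix out) := by unfold Spec_node_link_incidence_to_network; infer_instance

-- ===== CLAIM (what is proved, stated in full; the proofs are below) =====
def Claim_equal_node_link_incidence_to_network : Prop := ∀ (matrix : List (List Int)), Dom_node_link_incidence_to_network matrix → Pre_node_link_incidence_to_network matrix → Spec_node_link_incidence_to_network matrix (node_link_incidence_to_network matrix)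

-- ===== LEMMAS AND PROOFS =====

theorem nlB_pick_of_forall_ne (l : List Int) (r : Int) (h : ∀ a ∈ l, a ≠ r) :
    nlB_pick l r = l.head? := by
  cases l with
  | nil => rfl
  | cons a rest => simp [nlB_pick, h a (by simp)]

theorem nlA_scan_of_lt (rows : List (List Int)) (s r c : Int) (hr : r < s) :
    nlA_scan (PySem.List.enumerate rows s) r c =
      ((PySem.List.enumerate rows s).filterMap (fun p =>
        if (PySem.List.pyGet? p.2 c).getD 0 = -1 then some p.1 else none)).head? := by
  induction rows generalizing s with
  | nil => rfl
  | cons nl rest ih =>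
    rw [PySem.List.enumerate_cons]
    simp only [nlA_scan, List.filterMap_cons]
    have hne : ¬ (s = r) := by omega
    rw [if_neg hne]
    by_cases hm : (PySem.List.pyGet? nl c).getD 0 = -1
    · simp [hm]
    · simp only [hm, if_false]
      exact ih (s + 1) (by omega)

-- every first component in enumerate rows s is ≥ s
theorem nlEnum_fst_ge (rows : List (List Int)) (s : Int) (p : Int × List Int)
    (hp : p ∈ PySem.List.enumerate rows s) : s ≤ p.1 := by
  rcases (PySem.List.mem_enumerate_iff _ _ _).1 hp with ⟨k, hk, rfl⟩
  simp

-- KEY CELL LEMMA: A's inner rescan = B's first/second pick from the column's -1 list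
theorem nlA_scan_eq_pick (rows : List (List Int)) (s r c : Int) :
    nlA_scan (PySem.List.enumerate rows s) r c =
      nlB_pick ((PySem.List.enumerate rows s).filterMap (fun p =>
        if (PySem.List.pyGet? p.2 c).getD 0 = -1 then some p.1 else none)) r := by
  induction rows generalizing s with
  | nil => rfl
  | cons nl rest ih =>
    rw [PySem.List.enumerate_cons]
    simp only [nlA_scan, List.filterMap_cons]
    have hhead : ∀ a ∈ (PySem.List.enumerate rest (s+1)).filterMap (fun p =>
        if (PySem.List.pyGet? p.2 c).getD 0 = -1 then some p.1 else none), a ≠ s := by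
      intro a ha
      rcases List.mem_filterMap.1 ha with ⟨p, hp, hpa⟩
      have := nlEnum_fst_ge rest (s+1) p hp
      by_cases hm : (PySem.List.pyGet? p.2 c).getD 0 = -1
      · simp [hm] at hpa; omega
      · simp [hm] at hpa
    by_cases hsr : s = r
    · subst hsr
      by_cases hm : (PySem.List.pyGet? nl c).getD 0 = -1
      · rw [if_pos rfl, if_pos hm, nlA_scan_of_lt rest (s+1) s c (by omega)]
        simp [nlB_pick]
      · rw [if_pos rfl, if_neg hm, nlA_scan_of_lt rest (s+1) s c (by omega),
            nlB_pick_of_forall_ne _ s hhead]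
    · by_cases hm : (PySem.List.pyGet? nl c).getD 0 = -1
      · simp [hsr, hm, nlB_pick]
      · rw [if_neg hsr, if_neg hm, if_neg hm]
        exact ih (s + 1)

-- the guard 'c < len(row)' is redundant: an out-of-range pyGet? defaults to 0 ≠ -1
theorem nlGuard_redundant (matrix : List (List Int)) (c : Int) :
    (PySem.List.enumerate matrix).filterMap (fun p =>
        if c < (p.2.length : Int) ∧ (PySem.List.pyGet? p.2 c).getD 0 = -1 then some p.1 else none)
      = (PySem.List.enumerate matrix).filterMap (fun p =>
        if (PySem.List.pyGet? p.2 c).getD 0 = -1 then some p.1 else none) := by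
  have hbody : (fun p : Int × List Int =>
        if c < (p.2.length : Int) ∧ (PySem.List.pyGet? p.2 c).getD 0 = -1 then some p.1 else none)
      = (fun p : Int × List Int =>
        if (PySem.List.pyGet? p.2 c).getD 0 = -1 then some p.1 else none) := by
    funext p
    by_cases hc : c < (p.2.length : Int)
    · simp [hc]
    · have hnone : PySem.List.pyGet? p.2 c = none := by
        rw [PySem.List.pyGet?_eq_none_iff]
        simp [PySem.Raise.InRange]
        omega
      simp [hnone, hc]
  rw [hbody]

-- every row's length is bounded by B's width = max((len(row) for row in matrix), default=0)
theorem nlLen_le_width (matrix : List (List Int)) (row : List Int) (hm : row ∈ matrix) :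
    (row.length : Int) ≤ PySem.List.maxD (matrix.map (fun row => (row.length : Int))) (fun x => x) 0 := by
  unfold PySem.List.maxD
  cases hmax : PySem.List.max? (matrix.map (fun row => (row.length : Int))) (fun x => x) with
  | none =>
    rw [PySem.List.max?_eq_none_iff, List.map_eq_nil_iff] at hmax
    subst hmax
    simp at hm
  | some m =>
    exact PySem.List.max?_isMax hmax _ (List.mem_map.2 ⟨row, hm, rfl⟩)

-- B's table lookup neg[c] returns exactly the column's -1 list when 0 ≤ c < width
theorem nlNeg_lookup (matrix : List (List Int)) (width : Int) (c : Int)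
    (h0 : 0 ≤ c) (hc : c < width) :
    (PySem.List.pyGet? ((PySem.List.pyRange 0 width 1).map (fun c =>
        (PySem.List.enumerate matrix).filterMap (fun p =>
          if c < (p.2.length : Int) ∧ (PySem.List.pyGet? p.2 c).getD 0 = -1 then some p.1 else none))) c).getD []
      = (PySem.List.enumerate matrix).filterMap (fun p =>
          if (PySem.List.pyGet? p.2 c).getD 0 = -1 then some p.1 else none) := by
  rw [← nlGuard_redundant matrix c]
  rw [PySem.List.pyGet?_of_nonneg _ h0, List.getElem?_map]
  have hr : (PySem.List.pyRange 0 width 1)[c.toNat]? = some c := by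
    rw [List.getElem?_eq_getElem (by rw [PySem.List.length_pyRange_one]; omega)]
    rw [PySem.List.getElem_pyRange_one]
    congr 1
    omega
  rw [hr]
  rfl

-- generic: Set.ofList of a fold that appends optional events = fold that Set.adds the same events
theorem nlOfList_foldl {β : Type} (L : List β) (g : β → Option (Int × Int)) (l0 : List (Int × Int)) :
    PySem.Set.ofList (L.foldl (fun acc x =>
        match g x with | some y => acc ++ [y] | none => acc) l0)
      = L.foldl (fun s x =>
        match g x with | some y => PySem.Set.add s y | none => s) (PySem.Set.ofList l0) := by
  induction L generalizing l0 with
  | nil => rfl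
  | cons x L ih =>
    simp only [List.foldl_cons]
    cases hg : g x with
    | none => exact ih l0
    | some y =>
      rw [ih (l0 ++ [y])]
      congr 1
      show PySem.Set.ofList (l0 ++ [y]) = PySem.Set.add (PySem.Set.ofList l0) y
      rw [PySem.Set.ofList_eq_foldl, PySem.Set.ofList_eq_foldl, List.foldl_append]
      rfl


-- the row-major list of cells ((row index, row), (column index, value)) both ports iterate over
def nlCells (matrix : List (List Int)) : List ((Int × List Int) × (Int × Int)) :=
  (PySem.List.enumerate matrix).flatMap (fun p =>
    (PySem.List.enumerate p.2).map (fun q => (p, q)))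

-- the optional link A's cell step produces
def nlGA (matrix : List (List Int)) (x : (Int × List Int) × (Int × Int)) : Option (Int × Int) :=
  if x.2.2 = 1 ∨ x.2.2 = -1 then
    (nlA_scan (PySem.List.enumerate matrix) x.1.1 x.2.1).map (fun ra => (x.1.1 + 1, ra + 1))
  else none

-- the optional link B's cell step produces, given the precomputed table neg
def nlGB (neg : List (List Int)) (x : (Int × List Int) × (Int × Int)) : Option (Int × Int) :=
  if x.2.2 = 1 ∨ x.2.2 = -1 then
    (nlB_pick ((PySem.List.pyGet? neg x.2.1).getD []) x.1.1).map (fun t => (x.1.1 + 1, t + 1))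
  else none

theorem foldA_flat (matrix : List (List Int)) :
    (PySem.List.enumerate matrix).foldl (fun acc p =>
      (PySem.List.enumerate p.2).foldl (fun acc (q : Int × Int) =>
        if q.2 = 1 ∨ q.2 = -1 then
          match nlA_scan (PySem.List.enumerate matrix) p.1 q.1 with
          | some ra => acc ++ [(p.1 + 1, ra + 1)]
          | none => acc
        else acc) acc) []
    = (nlCells matrix).foldl (fun acc x =>
        match nlGA matrix x with | some y => acc ++ [y] | none => acc) [] := by
  unfold nlCells
  rw [List.foldl_flatMap]
  apply PySem.List.foldl_congr_mem
  intro acc p _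
  rw [List.foldl_map]
  apply PySem.List.foldl_congr_mem
  intro acc2 q _
  by_cases h : q.2 = 1 ∨ q.2 = -1
  · simp only [nlGA, h, if_true]
    cases nlA_scan (PySem.List.enumerate matrix) p.1 q.1 <;> rfl
  · simp [nlGA, h]

theorem foldB_flat (matrix : List (List Int)) (neg : List (List Int)) :
    (PySem.List.enumerate matrix).foldl (fun s p =>
      (PySem.List.enumerate p.2).foldl (fun s (q : Int × Int) =>
        if q.2 = 1 ∨ q.2 = -1 then
          match nlB_pick ((PySem.List.pyGet? neg q.1).getD []) p.1 with
          | some t => PySem.Set.add s (p.1 + 1, t + 1)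
          | none => s
        else s) s) PySem.Set.empty
    = (nlCells matrix).foldl (fun s x =>
        match nlGB neg x with | some y => PySem.Set.add s y | none => s) PySem.Set.empty := by
  unfold nlCells
  rw [List.foldl_flatMap]
  apply PySem.List.foldl_congr_mem
  intro s p _
  rw [List.foldl_map]
  apply PySem.List.foldl_congr_mem
  intro s2 q _
  by_cases h : q.2 = 1 ∨ q.2 = -1
  · simp only [nlGB, h, if_true]
    cases nlB_pick ((PySem.List.pyGet? neg q.1).getD []) p.1 <;> rfl
  · simp [nlGB, h]

-- per cell, A's rescan result = B's table lookup result
theorem nlGA_eq_nlGB (matrix : List (List Int))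
    (x : (Int × List Int) × (Int × Int)) (hx : x ∈ nlCells matrix) :
    nlGA matrix x
      = nlGB ((PySem.List.pyRange 0
            (PySem.List.maxD (matrix.map (fun row => (row.length : Int))) (fun x => x) 0) 1).map (fun c =>
          (PySem.List.enumerate matrix).filterMap (fun p =>
            if c < (p.2.length : Int) ∧ (PySem.List.pyGet? p.2 c).getD 0 = -1 then some p.1 else none))) x := by
  rcases List.mem_flatMap.1 hx with ⟨p, hp, hxq⟩
  rcases List.mem_map.1 hxq with ⟨q, hq, rfl⟩
  have hq1 : 0 ≤ q.1 ∧ q.1 < (p.2.length : Int) := by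
    rcases (PySem.List.mem_enumerate_iff _ _ _).1 hq with ⟨k, hk, rfl⟩
    simp
    omega
  have hpm : p.2 ∈ matrix := by
    rcases (PySem.List.mem_enumerate_iff _ _ _).1 hp with ⟨k, hk, rfl⟩
    simp
  have hwidth : (p.2.length : Int) ≤ PySem.List.maxD (matrix.map (fun row => (row.length : Int))) (fun x => x) 0 :=
    nlLen_le_width matrix p.2 hpm
  unfold nlGA nlGB
  by_cases h : q.2 = 1 ∨ q.2 = -1
  · rw [if_pos h, if_pos h]
    rw [nlNeg_lookup matrix _ q.1 hq1.1 (by omega)]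
    rw [nlA_scan_eq_pick matrix 0 p.1 q.1]
  · rw [if_neg h, if_neg h]

-- the Lean ports agree on every input: A's port replaces the out-of-range read that makes
-- Python A raise on inputs outside Pre_ by a harmless default, so the equality is total here;
-- Pre_ is where that port is faithful to Python A.
theorem nl_eq (matrix : List (List Int)) :
    node_link_incidence_to_network matrix = node_link_incidence_to_network_alt matrix := by
  simp only [node_link_incidence_to_network, node_link_incidence_to_network_alt]
  rw [foldA_flat, foldB_flat, nlOfList_foldl]
  congr 1
  apply PySem.List.foldl_congr_mem
  intro s x hx
  rw [nlGA_eq_nlGB matrix x hx]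

-- ===== VERDICT (by name: the statement is the Claim_ definition above) =====
theorem node_link_incidence_to_network_spec : Claim_equal_node_link_incidence_to_network := by
  intro matrix _dom _hpre
  exact nl_eq matrix
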